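-- pv_equiv track=rewrite | github.com/Arsen1302/Code-copy-detector | TestData/solutions/problem_683_3.py | solution_683_3
-- ===== SOURCE A (Python) =====
-- def solution_683_3(s: str) -> bool:
--     stack = []
--
--     for i in s:
--         if i == 'c' and len(stack) >= 2 and stack[-1] == 'b' and stack[-2] == 'a':
--             stack.pop()
--             stack.pop()
--         else:
--             stack.append(i)
--
--     if ''.join(stack) == 'abc': stack = []
--
--     return stack == []
-- ===== SOURCE B (Python) =====
-- def solution_683_3(s: str) -> bool:
--     while 'abc' in s:
--         s = s.replace('abc', '')
--     return s == ''
-- ===== Notes on version B (the rewrite author's own statement) =====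
-- stated objective: simpler
-- what changed: Replaced the one-pass character stack (with its dead final three-letter special case) by a fixed-point rewrite that repeatedly deletes every occurrence of the pattern via str.replace and tests emptiness; confluence of the non-overlapping rewrite gives the same answer.
import Mathlib
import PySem

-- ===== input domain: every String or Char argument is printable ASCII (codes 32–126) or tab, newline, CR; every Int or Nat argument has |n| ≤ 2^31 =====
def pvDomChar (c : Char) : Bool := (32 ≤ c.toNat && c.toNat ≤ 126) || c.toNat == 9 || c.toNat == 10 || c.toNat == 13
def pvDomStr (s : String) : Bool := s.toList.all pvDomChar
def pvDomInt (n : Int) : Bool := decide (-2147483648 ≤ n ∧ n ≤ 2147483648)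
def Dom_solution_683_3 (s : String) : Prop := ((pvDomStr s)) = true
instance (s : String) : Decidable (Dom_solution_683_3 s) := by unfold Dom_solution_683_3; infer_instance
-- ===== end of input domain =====

-- B replaces A's one-pass character stack by a fixed-point rewrite deleting 'abc'
-- occurrences via str.replace; same answer, simpler (objective: simpler, not faster).

-- ===== PORT A =====
-- The Python stack (append/pop at the right end, stack[-1]/stack[-2]) is kept
-- top-first: push = cons, stack[-1] = head, stack[-2] = second element.
def pvStep (st : List Char) (i : Char) : List Char :=
  match st with
  | b :: a :: rest => if i = 'c' ∧ b = 'b' ∧ a = 'a' then rest else i :: b :: a :: rest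
  | _ => i :: st

def solution_683_3 (s : String) : Bool :=
  let stack := s.toList.foldl pvStep []
  -- ''.join(stack) == 'abc' compared on the characters in Python order (stack.reverse)
  let stack := if stack.reverse = ['a', 'b', 'c'] then [] else stack
  decide (stack = [])

-- ===== PORT B =====
-- helper for the termination of the while-loop: replacing when 'abc' occurs shortens s
def pvRemoveAll (l : List Char) : List Char :=
  match l with
  | [] => []
  | c :: t => if ['a', 'b', 'c'] <+: (c :: t) then pvRemoveAll ((c :: t).drop 3)
              else c :: pvRemoveAll t
termination_by l.length
decreasing_by all_goals simp

theorem pvReplace_go_eq (fuel : Nat) (l acc : List Char) (h : l.length ≤ fuel) :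
    PySem.Chars.replace.go ['a', 'b', 'c'] [] fuel l acc = acc.reverse ++ pvRemoveAll l := by
  induction fuel generalizing l acc with
  | zero =>
    have : l = [] := by cases l <;> simp_all
    subst this; simp [PySem.Chars.replace.go, pvRemoveAll]
  | succ n ih =>
    cases l with
    | nil => simp [PySem.Chars.replace.go, pvRemoveAll]
    | cons c t =>
      rw [PySem.Chars.replace.go]
      by_cases hp : ['a', 'b', 'c'] <+: (c :: t)
      · rw [if_pos (List.isPrefixOf_iff_prefix.mpr hp)]
        rw [ih _ _ (by simp at h ⊢; omega)]
        rw [pvRemoveAll, if_pos hp]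
        simp
      · have hp' : ¬ ((['a', 'b', 'c'] : List Char).isPrefixOf (c :: t) = true) :=
          fun hb => hp (List.isPrefixOf_iff_prefix.mp hb)
        rw [if_neg hp']
        rw [ih _ _ (by simp at h ⊢; omega)]
        rw [pvRemoveAll, if_neg hp]
        simp

theorem pvReplace_eq (l : List Char) :
    PySem.Chars.replace l ['a', 'b', 'c'] [] = pvRemoveAll l := by
  rw [PySem.Chars.replace]
  simp [pvReplace_go_eq l.length l [] le_rfl]

theorem pvRemoveAll_length_le (l : List Char) : (pvRemoveAll l).length ≤ l.length := by
  induction l using pvRemoveAll.induct with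
  | case1 => simp [pvRemoveAll]
  | case2 c t hp ih => rw [pvRemoveAll, if_pos hp]; simp at ih ⊢; omega
  | case3 c t hp ih => rw [pvRemoveAll, if_neg hp]; simp; omega

theorem pvRemoveAll_lt (l : List Char) (h : ['a', 'b', 'c'] <:+: l) :
    (pvRemoveAll l).length < l.length := by
  induction l using pvRemoveAll.induct with
  | case1 => simp at h
  | case2 c t hp ih =>
    rw [pvRemoveAll, if_pos hp]
    have h3 : 3 ≤ (c :: t).length := hp.length_le
    have := pvRemoveAll_length_le ((c :: t).drop 3)
    simp at h3 this ⊢; omega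
  | case3 c t hp ih =>
    rw [pvRemoveAll, if_neg hp]
    rcases (List.infix_cons_iff.mp h) with h' | h'
    · exact absurd h' hp
    · have := ih h'; simp; omega

theorem pvReplace_lt (l : List Char) (h : PySem.Chars.isIn ['a', 'b', 'c'] l = true) :
    (PySem.Chars.replace l ['a', 'b', 'c'] []).length < l.length := by
  rw [pvReplace_eq]
  exact pvRemoveAll_lt l ((PySem.Chars.isIn_iff_infix _ _).mp h)

-- the while-loop of B: while 'abc' in s: s = s.replace('abc', '')
def pvLoop (l : List Char) : List Char :=
  if h : PySem.Chars.isIn ['a', 'b', 'c'] l = true then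
    pvLoop (PySem.Chars.replace l ['a', 'b', 'c'] [])
  else l
termination_by l.length
decreasing_by exact pvReplace_lt l h

def solution_683_3_alt (s : String) : Bool :=
  decide (pvLoop s.toList = [])

-- ===== PRECONDITION & SPEC =====
def Spec_solution_683_3 (s : String) (out : Bool) : Prop := out = solution_683_3_alt s
instance (s : String) (out : Bool) : Decidable (Spec_solution_683_3 s out) := by unfold Spec_solution_683_3; infer_instance

-- ===== CLAIM (what is proved, stated in full; the proofs are below) =====
def Claim_equal_solution_683_3 : Prop := ∀ (s : String), Dom_solution_683_3 s → Spec_solution_683_3 s (solution_683_3 s)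

-- ===== LEMMAS AND PROOFS =====

-- processing 'a','b','c' in a row leaves any stack unchanged
theorem pvStep_push (st : List Char) (c : Char) (h : c ≠ 'c') :
    pvStep st c = c :: st := by
  match st with
  | [] => rfl
  | [b] => rfl
  | b :: a :: rest => simp [pvStep, h]

theorem pvStep_abc (st : List Char) :
    pvStep (pvStep (pvStep st 'a') 'b') 'c' = st := by
  rw [pvStep_push st 'a' (by decide), pvStep_push _ 'b' (by decide)]
  simp [pvStep]

-- deleting all 'abc' occurrences does not change the stack run, from any stack
theorem foldl_pvRemoveAll (l : List Char) :
    ∀ st : List Char, (pvRemoveAll l).foldl pvStep st = l.foldl pvStep st := by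
  induction l using pvRemoveAll.induct with
  | case1 => intro st; simp [pvRemoveAll]
  | case2 c t hp ih =>
    intro st
    rw [pvRemoveAll, if_pos hp]
    obtain ⟨r, hr⟩ := hp
    have hd : (c :: t).drop 3 = r := by rw [← hr]; rfl
    rw [ih, hd, ← hr]
    simp [List.foldl, pvStep_abc]
  | case3 c t hp ih =>
    intro st
    rw [pvRemoveAll, if_neg hp]
    simp [List.foldl, ih]

theorem foldl_pvLoop (l : List Char) :
    (pvLoop l).foldl pvStep [] = l.foldl pvStep [] := by
  induction l using pvLoop.induct with
  | case1 l h ih =>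
    rw [pvLoop, dif_pos h, ih, pvReplace_eq, foldl_pvRemoveAll]
  | case2 l h => rw [pvLoop, dif_neg h]

theorem pvLoop_no_abc (l : List Char) :
    ¬ (['a', 'b', 'c'] <:+: pvLoop l) := by
  induction l using pvLoop.induct with
  | case1 l h ih => rw [pvLoop, dif_pos h]; exact ih
  | case2 l h =>
    rw [pvLoop, dif_neg h]
    exact fun hc => h ((PySem.Chars.isIn_iff_infix _ _).mpr hc)

-- the stack run of an 'abc'-free string pushes every character
theorem foldl_of_no_abc (v : List Char) :
    ∀ u : List Char, ¬ (['a', 'b', 'c'] <:+: u ++ v) →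
      v.foldl pvStep u.reverse = (u ++ v).reverse := by
  induction v with
  | nil => intro u _; simp
  | cons c t ih =>
    intro u h
    have hpush : pvStep u.reverse c = c :: u.reverse := by
      rcases hu : u.reverse with _ | ⟨b, _ | ⟨a, rest⟩⟩
      · rfl
      · rfl
      · simp only [pvStep]
        rw [if_neg]
        rintro ⟨rfl, rfl, rfl⟩
        apply h
        have hu' : u = ('b' :: 'a' :: rest).reverse := by rw [← hu, List.reverse_reverse]
        rw [hu']
        exact ⟨rest.reverse, t, by simp⟩
    have : (c :: t).foldl pvStep u.reverse = t.foldl pvStep (u ++ [c]).reverse := by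
      simp [List.foldl, hpush]
    rw [this, ih (u ++ [c]) (by simpa using h)]
    simp

theorem pv_stack_eq (l : List Char) :
    l.foldl pvStep [] = (pvLoop l).reverse := by
  rw [← foldl_pvLoop]
  have := foldl_of_no_abc (pvLoop l) [] (by simpa using pvLoop_no_abc l)
  simpa using this

-- ===== VERDICT (by name: the statement is the Claim_ definition above) =====
theorem solution_683_3_spec : Claim_equal_solution_683_3 := by
  intro s _
  unfold Spec_solution_683_3 solution_683_3 solution_683_3_alt
  simp only [pv_stack_eq, List.reverse_reverse]
  by_cases h : pvLoop s.toList = ['a', 'b', 'c']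
  · exact absurd (h ▸ List.infix_refl _) (pvLoop_no_abc s.toList)
  · simp [h]
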